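-- pv_equiv track=rewrite | github.com/aaronshin43/DailyMenu | email_templates.py | generate_html_email
-- ===== SOURCE A (Python) =====
-- def generate_html_email(menu_items, date_str):
--     """
--     Generates a clean HTML email body from the filtered menu items.
--     menu_items: List of dicts [{'meal': ..., 'station': ..., 'name': ..., 'description': ...}]
--     """
--     # Group by Meal -> Station
--     grouped = {}
--     for item in menu_items:
--         meal = item['meal'].capitalize()
--         station = item['station']
--         if meal not in grouped:
--             grouped[meal] = {}
--         if station not in grouped[meal]:
--             grouped[meal][station] = []
--         grouped[meal][station].append(item)
--
--     # Build HTML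
--     html = f"""
--     <html>
--     <head>
--         <style>
--             body {{ font-family: 'Segoe UI', Tahoma, Geneva, Verdana, sans-serif; color: #333; line-height: 1.6; }}
--             .container {{ max-width: 600px; margin: 0 auto; padding: 20px; }}
--             .header {{ background-color: #d32f2f; color: white; padding: 15px; text-align: center; border-radius: 5px 5px 0 0; }}
--             .date {{ font-size: 0.9em; margin-top: 5px; opacity: 0.9; }}
--             .meal-section {{ margin-bottom: 30px; border: 1px solid #eee; border-radius: 0 0 5px 5px; padding: 15px; background: #fff; }}
--             .meal-title {{ color: #d32f2f; border-bottom: 2px solid #d32f2f; padding-bottom: 5px; margin-top: 0; }}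
--             .station-group {{ margin-bottom: 15px; }}
--             .station-name {{ font-weight: bold; color: #555; text-transform: uppercase; font-size: 0.8em; margin-bottom: 5px; background: #f5f5f5; padding: 3px 8px; display: inline-block; border-radius: 3px; }}
--             .menu-item {{ margin-bottom: 8px; padding-left: 10px; border-left: 3px solid #eee; }}
--             .item-name {{ font-weight: 600; font-size: 1.05em; }}
--             .item-desc {{ font-size: 0.9em; color: #666; font-style: italic; }}
--             .footer {{ text-align: center; margin-top: 30px; font-size: 0.8em; color: #999; }}
--             a {{ color: #d32f2f; text-decoration: none; }}
--         </style>
--     </head>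
--     <body>
--         <div class="container">
--             <div class="header">
--                 <h1>Dickinson Dining Daily</h1>
--                 <div class="date">{date_str}</div>
--             </div>
--     """
--
--     # Order meals logically
--     meal_order = ["Breakfast", "Lunch", "Dinner"]
--
--     has_content = False
--     for meal in meal_order:
--         if meal in grouped:
--             has_content = True
--             html += f'<div class="meal-section"><h2 class="meal-title">{meal}</h2>'
--
--             # Sort stations alphabetically
--             sorted_stations = sorted(grouped[meal].keys())
--             for station in sorted_stations:
--                 html += f'<div class="station-group"><div class="station-name">{station}</div>'
--                 for item in grouped[meal][station]:
--                     desc = f'<div class="item-desc">{item["description"]}</div>' if item["description"] else ""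
--                     html += f'<div class="menu-item"><div class="item-name">{item["name"]}</div>{desc}</div>'
--                 html += '</div>'
--             html += '</div>'
--
--     if not has_content:
--         html += '<p style="text-align:center; padding: 20px;">No menu items matched your preferences for today.</p>'
--
--     html += """
--             <div class="footer">
--                 <p>You are receiving this email because you subscribed to Dickinson Dining Daily.</p>
--                 <p><a href="#">Manage Preferences</a> | <a href="#">Unsubscribe</a></p>
--             </div>
--         </div>
--     </body>
--     </html>
--     """
--     return html
-- ===== SOURCE B (Python) =====
-- NO_ITEMS = '<p style="text-align:center; padding: 20px;">No menu items matched your preferences for today.</p>'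
--
-- FOOTER = """
--             <div class="footer">
--                 <p>You are receiving this email because you subscribed to Dickinson Dining Daily.</p>
--                 <p><a href="#">Manage Preferences</a> | <a href="#">Unsubscribe</a></p>
--             </div>
--         </div>
--     </body>
--     </html>
--     """
--
--
-- def _item_html(it):
--     desc = f'<div class="item-desc">{it["description"]}</div>' if it["description"] else ""
--     return f'<div class="menu-item"><div class="item-name">{it["name"]}</div>{desc}</div>'
--
--
-- def _station_html(items, station):
--     body = ''.join(_item_html(it) for it in items if it['station'] == station)
--     return f'<div class="station-group"><div class="station-name">{station}</div>' + body + '</div>'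
--
--
-- def _meal_html(meal, items):
--     body = ''.join(_station_html(items, s) for s in sorted({it['station'] for it in items}))
--     return f'<div class="meal-section"><h2 class="meal-title">{meal}</h2>' + body + '</div>'
--
--
-- def generate_html_email(menu_items, date_str):
--     """Compositional rebuild: no grouping dict — per-meal filters, a station set, pure helpers joined at the end."""
--     header = f"""
--     <html>
--     <head>
--         <style>
--             body {{ font-family: 'Segoe UI', Tahoma, Geneva, Verdana, sans-serif; color: #333; line-height: 1.6; }}
--             .container {{ max-width: 600px; margin: 0 auto; padding: 20px; }}
--             .header {{ background-color: #d32f2f; color: white; padding: 15px; text-align: center; border-radius: 5px 5px 0 0; }}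
--             .date {{ font-size: 0.9em; margin-top: 5px; opacity: 0.9; }}
--             .meal-section {{ margin-bottom: 30px; border: 1px solid #eee; border-radius: 0 0 5px 5px; padding: 15px; background: #fff; }}
--             .meal-title {{ color: #d32f2f; border-bottom: 2px solid #d32f2f; padding-bottom: 5px; margin-top: 0; }}
--             .station-group {{ margin-bottom: 15px; }}
--             .station-name {{ font-weight: bold; color: #555; text-transform: uppercase; font-size: 0.8em; margin-bottom: 5px; background: #f5f5f5; padding: 3px 8px; display: inline-block; border-radius: 3px; }}
--             .menu-item {{ margin-bottom: 8px; padding-left: 10px; border-left: 3px solid #eee; }}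
--             .item-name {{ font-weight: 600; font-size: 1.05em; }}
--             .item-desc {{ font-size: 0.9em; color: #666; font-style: italic; }}
--             .footer {{ text-align: center; margin-top: 30px; font-size: 0.8em; color: #999; }}
--             a {{ color: #d32f2f; text-decoration: none; }}
--         </style>
--     </head>
--     <body>
--         <div class="container">
--             <div class="header">
--                 <h1>Dickinson Dining Daily</h1>
--                 <div class="date">{date_str}</div>
--             </div>
--     """
--     sections = []
--     for meal in ("Breakfast", "Lunch", "Dinner"):
--         meal_items = [it for it in menu_items if it['meal'].capitalize() == meal]
--         if meal_items:
--             sections.append(_meal_html(meal, meal_items))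
--     body = ''.join(sections) if sections else NO_ITEMS
--     return header + body + FOOTER
-- ===== Notes on version B (the rewrite author's own statement) =====
-- stated objective: alternative
-- what changed: Replaced A's mutable nested grouping dict and string-accumulator loop by a compositional build: per-meal filters over the input, a station set sorted once, and pure item/station/meal HTML helpers joined at the end.
import Mathlib
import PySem

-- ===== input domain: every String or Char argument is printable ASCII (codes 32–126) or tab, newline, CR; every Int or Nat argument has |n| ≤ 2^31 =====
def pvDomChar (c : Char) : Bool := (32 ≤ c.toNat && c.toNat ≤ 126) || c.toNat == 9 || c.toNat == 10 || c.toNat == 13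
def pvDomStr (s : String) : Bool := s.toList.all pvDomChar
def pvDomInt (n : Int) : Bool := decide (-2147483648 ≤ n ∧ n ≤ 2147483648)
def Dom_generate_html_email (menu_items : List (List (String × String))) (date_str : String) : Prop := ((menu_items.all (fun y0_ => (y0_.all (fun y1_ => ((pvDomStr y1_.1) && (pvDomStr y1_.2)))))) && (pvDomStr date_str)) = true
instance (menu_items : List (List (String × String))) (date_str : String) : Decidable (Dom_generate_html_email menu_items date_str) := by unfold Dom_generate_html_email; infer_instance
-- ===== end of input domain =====

-- B rebuilds the email compositionally (per-meal filters + a station set + pure helpers joined once) instead of A's mutable nested grouping dict; objective: alternative structure, same exact output.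

def pvH1 : List Char := ("\n    <html>\n    <head>\n        <style>\n            body { font-family: 'Segoe UI', Tahoma, Geneva, Verdana, sans-serif; color: #333; line-height: 1.6; }\n            .container { max-width: 600px; margin: 0 auto; padding: 20px; }\n            .header { background-color: #d32f2f; color: white; padding: 15px; text-align: center; border-radius: 5px 5px 0 0; }\n            .date { font-size: 0.9em; margin-top: 5px; opacity: 0.9; }\n            .meal-section { margin-bottom: 30px; border: 1px solid #eee; border-radius: 0 0 5px 5px; padding: 15px; background: #fff; }\n            .meal-title { color: #d32f2f; border-bottom: 2px solid #d32f2f; padding-bottom: 5px; margin-top: 0; }\n            .station-group { margin-bottom: 15px; }\n            .station-name { font-weight: bold; color: #555; text-transform: uppercase; font-size: 0.8em; margin-bottom: 5px; background: #f5f5f5; padding: 3px 8px; display: inline-block; border-radius: 3px; }\n            .menu-item { margin-bottom: 8px; padding-left: 10px; border-left: 3px solid #eee; }\n            .item-name { font-weight: 600; font-size: 1.05em; }\n            .item-desc { font-size: 0.9em; color: #666; font-style: italic; }\n            .footer { text-align: center; margin-top: 30px; font-size: 0.8em; color: #999; }\n            a { color: #d32f2f; text-decoration: none; }\n        </style>\n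    </head>\n    <body>\n        <div class=\"container\">\n            <div class=\"header\">\n                <h1>Dickinson Dining Daily</h1>\n                <div class=\"date\">" : String).toList
def pvH2 : List Char := ("</div>\n            </div>\n    " : String).toList
def pvNoItems : List Char := ("<p style=\"text-align:center; padding: 20px;\">No menu items matched your preferences for today.</p>" : String).toList
def pvFooter : List Char := ("\n            <div class=\"footer\">\n                <p>You are receiving this email because you subscribed to Dickinson Dining Daily.</p>\n                <p><a href=\"#\">Manage Preferences</a> | <a href=\"#\">Unsubscribe</a></p>\n            </div>\n        </div>\n    </body>\n    </html>\n    " : String).toList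

def pvDget (it : List (String × String)) (k : String) : String :=
  (PySem.Dict.mk it).getD k ""

-- Python str.capitalize, exact on the ASCII domain
def pvCap (s : String) : String :=
  match s.toList with
  | [] => ""
  | c :: cs => String.ofList (PySem.Chars.upperChar c :: PySem.Chars.lower cs)

-- ===== PORT A =====
def pvStepA (g : PySem.Dict String (PySem.Dict String (List (List (String × String)))))
    (item : List (String × String)) :
    PySem.Dict String (PySem.Dict String (List (List (String × String)))) :=
  let meal := pvCap (pvDget item "meal")
  let station := pvDget item "station"
  let g1 := if g.contains meal then g else g.insert meal PySem.Dict.empty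
  let inner := g1.getD meal PySem.Dict.empty
  let inner1 := if inner.contains station then inner else inner.insert station []
  let inner2 := inner1.insert station (inner1.getD station [] ++ [item])
  g1.insert meal inner2

def pvItemHtmlA (it : List (String × String)) : List Char :=
  let desc : List Char :=
    if (pvDget it "description").toList ≠ [] then
      ("<div class=\"item-desc\">").toList ++ (pvDget it "description").toList ++ ("</div>").toList
    else []
  ("<div class=\"menu-item\"><div class=\"item-name\">").toList ++ (pvDget it "name").toList
    ++ ("</div>").toList ++ desc ++ ("</div>").toList

def generate_html_email (menu_items : List (List (String × String))) (date_str : String) : String :=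
  let grouped := menu_items.foldl pvStepA PySem.Dict.empty
  let html0 : List Char := pvH1 ++ date_str.toList ++ pvH2
  let st := (["Breakfast", "Lunch", "Dinner"] : List String).foldl
    (fun (s : List Char × Bool) meal =>
      if grouped.contains meal then
        let html := s.1 ++ ("<div class=\"meal-section\"><h2 class=\"meal-title\">").toList
          ++ meal.toList ++ ("</h2>").toList
        let sorted_stations :=
          PySem.List.sorted (grouped.getD meal PySem.Dict.empty).keys (fun x => x) false
        let html := sorted_stations.foldl (fun h station =>
          let h := h ++ ("<div class=\"station-group\"><div class=\"station-name\">").toList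
            ++ station.toList ++ ("</div>").toList
          let h := ((grouped.getD meal PySem.Dict.empty).getD station []).foldl
            (fun h it => h ++ pvItemHtmlA it) h
          h ++ ("</div>").toList) html
        (html ++ ("</div>").toList, true)
      else s) (html0, false)
  let html := if st.2 then st.1 else st.1 ++ pvNoItems
  String.ofList (html ++ pvFooter)

-- ===== PORT B =====
def pvItemHtmlB (it : List (String × String)) : List Char :=
  let desc : List Char :=
    if (pvDget it "description").toList ≠ [] then
      ("<div class=\"item-desc\">").toList ++ (pvDget it "description").toList ++ ("</div>").toList
    else []
  ("<div class=\"menu-item\"><div class=\"item-name\">").toList ++ (pvDget it "name").toList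
    ++ ("</div>").toList ++ desc ++ ("</div>").toList

def pvStationHtmlB (items : List (List (String × String))) (station : String) : List Char :=
  ("<div class=\"station-group\"><div class=\"station-name\">").toList ++ station.toList
    ++ ("</div>").toList
    ++ (items.filter (fun it => pvDget it "station" == station)).flatMap pvItemHtmlB
    ++ ("</div>").toList

def pvMealHtmlB (meal : String) (items : List (List (String × String))) : List Char :=
  ("<div class=\"meal-section\"><h2 class=\"meal-title\">").toList ++ meal.toList
    ++ ("</h2>").toList
    ++ (PySem.List.sorted (PySem.Set.ofList (items.map (fun it => pvDget it "station")))
          (fun x => x) false).flatMap (pvStationHtmlB items)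
    ++ ("</div>").toList

def generate_html_email_alt (menu_items : List (List (String × String))) (date_str : String) : String :=
  let sections := (["Breakfast", "Lunch", "Dinner"] : List String).foldl
    (fun (acc : List (List Char)) meal =>
      let meal_items := menu_items.filter (fun it => pvCap (pvDget it "meal") == meal)
      if meal_items.isEmpty then acc else acc ++ [pvMealHtmlB meal meal_items]) []
  let body := if sections.isEmpty then pvNoItems else sections.flatten
  String.ofList (pvH1 ++ date_str.toList ++ pvH2 ++ body ++ pvFooter)

-- ===== PRECONDITION & SPEC =====
-- Pre_ excludes exactly the inputs on which Python A raises KeyError: an item missing one of the four keys.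
def Pre_generate_html_email (menu_items : List (List (String × String))) (date_str : String) : Prop :=
  ∀ it ∈ menu_items, "meal" ∈ it.map Prod.fst ∧ "station" ∈ it.map Prod.fst
    ∧ "name" ∈ it.map Prod.fst ∧ "description" ∈ it.map Prod.fst

instance (menu_items : List (List (String × String))) (date_str : String) :
    Decidable (Pre_generate_html_email menu_items date_str) := by
  unfold Pre_generate_html_email; infer_instance

def pvWitness_generate_html_email : (List (List (String × String))) × String :=
  ([[("meal", "lunch"), ("station", "Grill"), ("name", "Tacos"), ("description", "")]], "Jan 1")

def Spec_generate_html_email (menu_items : List (List (String × String))) (date_str : String) (out : String) : Prop := out = generate_html_email_alt menu_items date_str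
instance (menu_items : List (List (String × String))) (date_str : String) (out : String) : Decidable (Spec_generate_html_email menu_items date_str out) := by unfold Spec_generate_html_email; infer_instance

-- ===== CLAIM (what is proved, stated in full; the proofs are below) =====
def Claim_equal_generate_html_email : Prop := ∀ (menu_items : List (List (String × String))) (date_str : String), Dom_generate_html_email menu_items date_str → Pre_generate_html_email menu_items date_str → Spec_generate_html_email menu_items date_str (generate_html_email menu_items date_str)

-- ===== LEMMAS AND PROOFS =====

def pvKeyf (it : List (String × String)) : String := pvCap (pvDget it "meal")
def pvSf (it : List (String × String)) : String := pvDget it "station"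

lemma g1_getD_self {ν : Type} (g : PySem.Dict String ν) (meal : String) (d : ν) :
    (if g.contains meal then g else g.insert meal d).getD meal d = g.getD meal d := by
  by_cases hc : g.contains meal = true
  · simp [hc]
  · rw [if_neg (by simp [hc]), PySem.Dict.getD_insert_self,
      PySem.Dict.getD_of_not_contains g d (by simp [hc])]

lemma g1_getD_ne {ν : Type} (g : PySem.Dict String ν) (meal m : String) (d d' : ν)
    (h : m ≠ meal) :
    (if g.contains meal then g else g.insert meal d).getD m d' = g.getD m d' := by
  by_cases hc : g.contains meal = true
  · simp [hc]
  · rw [if_neg (by simp [hc]), PySem.Dict.getD_insert_of_ne g d d' h]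

lemma inner1_getD (inner : PySem.Dict String (List (List (String × String)))) (station s : String) :
    (if inner.contains station then inner else inner.insert station []).getD s [] =
      inner.getD s [] := by
  by_cases hc : inner.contains station = true
  · simp [hc]
  · by_cases hs : s = station
    · subst hs
      rw [if_neg (by simp [hc]), PySem.Dict.getD_insert_self,
        PySem.Dict.getD_of_not_contains inner [] (by simp [hc])]
    · rw [if_neg (by simp [hc]), PySem.Dict.getD_insert_of_ne inner [] [] hs]

lemma inner1_keys (inner : PySem.Dict String (List (List (String × String)))) (station : String) :
    (if inner.contains station then inner else inner.insert station []).keys =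
      PySem.Set.add inner.keys station := by
  rw [PySem.Set.add_eq_ite]
  by_cases hc : inner.contains station = true
  · rw [if_pos hc, if_pos ((PySem.Dict.contains_iff_mem_keys _ _).mp hc)]
  · have hmem : ¬ station ∈ inner.keys := fun h => hc ((PySem.Dict.contains_iff_mem_keys _ _).mpr h)
    rw [if_neg (by simp [hc]), if_neg hmem,
      PySem.Dict.keys_insert_of_not_contains inner [] (by simp [hc])]

lemma inner1_contains_station (inner : PySem.Dict String (List (List (String × String))))
    (station : String) :
    (if inner.contains station then inner else inner.insert station []).contains station = true := by
  by_cases hc : inner.contains station = true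
  · simp [hc]
  · rw [if_neg (by simp [hc])]; exact PySem.Dict.contains_insert_self _ _ _

lemma pvStep_getD_getD (g : PySem.Dict String (PySem.Dict String (List (List (String × String)))))
    (it : List (String × String)) (m s : String) :
    (((pvStepA g it).getD m PySem.Dict.empty).getD s []) =
      ((g.getD m PySem.Dict.empty).getD s []) ++
        (if pvKeyf it = m ∧ pvSf it = s then [it] else []) := by
  unfold pvStepA pvKeyf pvSf
  by_cases hm : m = pvCap (pvDget it "meal")
  · rw [← hm, PySem.Dict.getD_insert_self]
    by_cases hs : s = pvDget it "station"
    · rw [← hs, PySem.Dict.getD_insert_self, inner1_getD, g1_getD_self]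
      simp [hm.symm, hs.symm]
    · rw [PySem.Dict.getD_insert_of_ne _ _ _ hs, inner1_getD, g1_getD_self,
        if_neg (fun h => hs h.2.symm), List.append_nil]
  · rw [PySem.Dict.getD_insert_of_ne _ _ _ hm, g1_getD_ne _ _ _ _ _ hm,
      if_neg (fun h => hm h.1.symm), List.append_nil]

lemma pvStep_keys (g : PySem.Dict String (PySem.Dict String (List (List (String × String)))))
    (it : List (String × String)) (m : String) :
    ((pvStepA g it).getD m PySem.Dict.empty).keys =
      if pvKeyf it = m then PySem.Set.add ((g.getD m PySem.Dict.empty).keys) (pvSf it)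
      else ((g.getD m PySem.Dict.empty).keys) := by
  unfold pvStepA pvKeyf pvSf
  by_cases hm : m = pvCap (pvDget it "meal")
  · rw [← hm, PySem.Dict.getD_insert_self,
      PySem.Dict.keys_insert_of_contains _ _ (inner1_contains_station _ _), inner1_keys,
      g1_getD_self, if_pos rfl]
  · rw [PySem.Dict.getD_insert_of_ne _ _ _ hm, g1_getD_ne _ _ _ _ _ hm,
      if_neg (fun h => hm h.symm)]

lemma pvStep_contains (g : PySem.Dict String (PySem.Dict String (List (List (String × String)))))
    (it : List (String × String)) (m : String) :
    (pvStepA g it).contains m = (m == pvKeyf it || g.contains m) := by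
  unfold pvStepA pvKeyf
  by_cases hc : g.contains (pvCap (pvDget it "meal")) = true <;>
    by_cases hm : m = pvCap (pvDget it "meal") <;>
      simp_all [PySem.Dict.contains_insert]

lemma pvBuild_contains (l : List (List (String × String)))
    (g : PySem.Dict String (PySem.Dict String (List (List (String × String))))) (m : String) :
    (l.foldl pvStepA g).contains m = (g.contains m || l.any (fun it => pvKeyf it == m)) := by
  induction l generalizing g with
  | nil => simp
  | cons x xs ih =>
    simp only [List.foldl_cons, List.any_cons, ih, pvStep_contains]
    cases h1 : g.contains m <;> cases h2 : (pvKeyf x == m) <;>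
      simp_all [BEq.comm]
  
lemma pvBuild_getD_getD (l : List (List (String × String)))
    (g : PySem.Dict String (PySem.Dict String (List (List (String × String))))) (m s : String) :
    ((l.foldl pvStepA g).getD m PySem.Dict.empty).getD s [] =
      ((g.getD m PySem.Dict.empty).getD s []) ++
        l.filter (fun it => pvKeyf it == m && pvSf it == s) := by
  induction l generalizing g with
  | nil => simp
  | cons x xs ih =>
    simp only [List.foldl_cons, List.filter_cons, ih, pvStep_getD_getD]
    by_cases h : pvKeyf x = m ∧ pvSf x = s
    · simp [h.1, h.2]
    · have : (pvKeyf x == m && pvSf x == s) = false := by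
        by_cases h1 : pvKeyf x = m <;> by_cases h2 : pvSf x = s <;> simp_all
      simp [h, this]

lemma pvBuild_keys (l : List (List (String × String)))
    (g : PySem.Dict String (PySem.Dict String (List (List (String × String))))) (m : String) :
    ((l.foldl pvStepA g).getD m PySem.Dict.empty).keys =
      PySem.Set.update ((g.getD m PySem.Dict.empty).keys)
        ((l.filter (fun it => pvKeyf it == m)).map pvSf) := by
  induction l generalizing g with
  | nil => simp [PySem.Set.update_nil]
  | cons x xs ih =>
    simp only [List.foldl_cons, List.filter_cons, ih, pvStep_keys]
    by_cases h : pvKeyf x = m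
    · simp [h, PySem.Set.update_cons]
    · have : (pvKeyf x == m) = false := by simp [h]
      simp [h, this]


lemma pvG_contains (mi : List (List (String × String))) (m : String) :
    (mi.foldl pvStepA PySem.Dict.empty).contains m =
      mi.any (fun it => pvCap (pvDget it "meal") == m) := by
  rw [pvBuild_contains]
  simp only [PySem.Dict.contains_empty, Bool.false_or]
  rfl

lemma pvItems_eq (mi : List (List (String × String))) (m s : String) :
    ((mi.foldl pvStepA PySem.Dict.empty).getD m PySem.Dict.empty).getD s [] =
      (mi.filter (fun it => pvCap (pvDget it "meal") == m)).filter
        (fun it => pvDget it "station" == s) := by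
  rw [pvBuild_getD_getD]
  simp only [PySem.Dict.getD_empty, PySem.Dict.getD_empty, List.nil_append, List.filter_filter]
  exact List.filter_congr (fun it _ => by simp [pvKeyf, pvSf, Bool.and_comm])

lemma pvKeys_eq (mi : List (List (String × String))) (m : String) :
    ((mi.foldl pvStepA PySem.Dict.empty).getD m PySem.Dict.empty).keys =
      PySem.Set.ofList ((mi.filter (fun it => pvCap (pvDget it "meal") == m)).map
        (fun it => pvDget it "station")) := by
  rw [pvBuild_keys]
  simp only [PySem.Dict.getD_empty, PySem.Dict.keys_empty, PySem.Set.update_nil_left]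
  rfl

lemma pvItemHtml_eq : pvItemHtmlA = pvItemHtmlB := rfl

lemma pvIsEmpty_filter {α : Type} (l : List α) (p : α → Bool) :
    (l.filter p).isEmpty = !l.any p := by
  cases h : l.any p <;> simp_all [List.isEmpty_iff, List.filter_eq_nil_iff]

-- A's station loop over any items list, rewritten as the flatMap B builds
lemma pvStationFold (items : List (List (String × String))) (stations : List String)
    (acc : List Char) :
    stations.foldl (fun h station =>
      ((items.filter (fun it => pvDget it "station" == station)).foldl
        (fun h it => h ++ pvItemHtmlA it)
        (h ++ ("<div class=\"station-group\"><div class=\"station-name\">").toList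
          ++ station.toList ++ ("</div>").toList)) ++ ("</div>").toList) acc
    = acc ++ stations.flatMap (pvStationHtmlB items) := by
  have hbody : ∀ (h : List Char) (station : String),
      ((items.filter (fun it => pvDget it "station" == station)).foldl
        (fun h it => h ++ pvItemHtmlA it)
        (h ++ ("<div class=\"station-group\"><div class=\"station-name\">").toList
          ++ station.toList ++ ("</div>").toList)) ++ ("</div>").toList
      = h ++ pvStationHtmlB items station := by
    intro h station
    rw [PySem.List.foldl_append_eq_flatMap]
    simp [pvStationHtmlB, pvItemHtml_eq, List.append_assoc]
  calc stations.foldl _ acc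
      = stations.foldl (fun h station => h ++ pvStationHtmlB items station) acc :=
        PySem.List.foldl_congr_mem' _ _ _ _ (fun station _ h => hbody h station)
    _ = acc ++ stations.flatMap (pvStationHtmlB items) :=
        PySem.List.foldl_append_eq_flatMap _ _ _

-- A's whole meal chunk equals B's pvMealHtmlB
lemma pvMealChunk (mi : List (List (String × String))) (m : String) (acc : List Char) :
    (PySem.List.sorted ((mi.foldl pvStepA PySem.Dict.empty).getD m PySem.Dict.empty).keys
        (fun x => x) false).foldl (fun h station =>
      ((((mi.foldl pvStepA PySem.Dict.empty).getD m PySem.Dict.empty).getD station []).foldl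
        (fun h it => h ++ pvItemHtmlA it)
        (h ++ ("<div class=\"station-group\"><div class=\"station-name\">").toList
          ++ station.toList ++ ("</div>").toList)) ++ ("</div>").toList)
      (acc ++ ("<div class=\"meal-section\"><h2 class=\"meal-title\">").toList
        ++ m.toList ++ ("</h2>").toList) ++ ("</div>").toList
    = acc ++ pvMealHtmlB m (mi.filter (fun it => pvCap (pvDget it "meal") == m)) := by
  simp only [pvItems_eq, pvKeys_eq]
  rw [pvStationFold]
  simp [pvMealHtmlB, List.append_assoc]

-- ===== VERDICT (by name: the statement is the Claim_ definition above) =====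
set_option maxRecDepth 8192 in
theorem generate_html_email_spec : Claim_equal_generate_html_email := by
  intro mi ds _ _
  unfold Spec_generate_html_email generate_html_email generate_html_email_alt
  simp only [List.foldl_cons, List.foldl_nil]
  have eB := pvIsEmpty_filter mi (fun it => pvCap (pvDget it "meal") == "Breakfast")
  have eL := pvIsEmpty_filter mi (fun it => pvCap (pvDget it "meal") == "Lunch")
  have eD := pvIsEmpty_filter mi (fun it => pvCap (pvDget it "meal") == "Dinner")
  rw [← pvG_contains] at eB eL eD
  cases hB : (mi.foldl pvStepA PySem.Dict.empty).contains "Breakfast" <;>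
  cases hL : (mi.foldl pvStepA PySem.Dict.empty).contains "Lunch" <;>
  cases hD : (mi.foldl pvStepA PySem.Dict.empty).contains "Dinner" <;>
  rw [hB] at eB <;> rw [hL] at eL <;> rw [hD] at eD <;>
  simp only [hB, hL, hD, eB, eL, eD, Bool.false_eq_true, Bool.not_false, Bool.not_true,
    if_true, if_false, List.isEmpty_nil, List.append_nil, List.nil_append,
    List.flatten_cons, List.flatten_nil, List.isEmpty_cons] <;>
  simp only [pvMealChunk] <;>
  simp [List.append_assoc]
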